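-- pv_equiv track=rewrite | github.com/HN-9/Advent-of-Code-2024-Python | Day-25/Day25.py | schematic_to_heights
-- ===== SOURCE A (Python) =====
-- def schematic_to_heights(schematic, reverse=False):
--     heights = []
--     width = len(schematic[0])
--     height = len(schematic)
--
--     for col in range(width):
--         count = 0
--         for row in range(height):
--             if not reverse:
--                 char = schematic[row][col]
--             else:
--                 char = schematic[height - 1 - row][col]
--             if char == "#":
--                 count += 1
--             else:
--                 break
--         heights.append(count)
--
--     return heights
-- ===== SOURCE B (Python) =====
-- def _prefix_hashes(column):
--     return len(column) - len(column.lstrip('#'))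
--
--
-- def schematic_to_heights(schematic, reverse=False):
--     height = len(schematic)
--     rows = range(height - 1, -1, -1) if reverse else range(height)
--     return [_prefix_hashes(''.join(schematic[r][c] for r in rows))
--             for c in range(len(schematic[0]))]
-- ===== Notes on version B (the rewrite author's own statement) =====
-- stated objective: simpler
-- what changed: Instead of a nested cell loop with an early break and an append accumulator, B materializes each column as a string (bottom-up when reverse) and measures its leading-'#' run as len(col) - len(col.lstrip('#')), collected by a comprehension.
-- outside the precondition, e.g. on schematic_to_heights(['..', '.'], False): A returns [0, 0], B raises IndexError
import Mathlib
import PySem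

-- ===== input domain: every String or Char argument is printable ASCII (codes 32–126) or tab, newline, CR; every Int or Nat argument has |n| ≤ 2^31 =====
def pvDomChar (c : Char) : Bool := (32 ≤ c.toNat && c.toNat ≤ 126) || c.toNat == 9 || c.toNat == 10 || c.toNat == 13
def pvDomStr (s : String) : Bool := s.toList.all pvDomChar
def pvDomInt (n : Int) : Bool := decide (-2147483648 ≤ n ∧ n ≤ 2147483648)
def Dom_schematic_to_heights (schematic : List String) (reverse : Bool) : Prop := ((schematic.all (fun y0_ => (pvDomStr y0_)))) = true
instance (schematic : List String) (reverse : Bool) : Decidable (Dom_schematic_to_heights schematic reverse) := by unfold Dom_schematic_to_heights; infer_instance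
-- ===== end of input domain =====

-- B replaces A's nested scan-with-break by materializing each column and stripping its '#'-prefix; objective: simpler decomposition (same cost).


-- cell access schematic[r][c]; inside Pre_ both indices are in range, so the defaults are never returned
def pvCell (schematic : List String) (r c : Nat) : Char :=
  (((schematic[r]?.getD "").toList[c]?).getD ' ')

-- ===== PORT A =====
-- A's inner loop: 'for row in range(height): … break' over the remaining row indices, with the running count
def pvAInner (f : Nat → Char) : List Nat → Int → Int
  | [], count => count
  | r :: rs, count => if f r == '#' then pvAInner f rs (count + 1) else count

def schematic_to_heights (schematic : List String) (reverse : Bool) : List Int :=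
  let width := ((schematic.headD "").length)
  let height := schematic.length
  (List.range width).foldl
    (fun heights col =>
      heights ++ [pvAInner
        (fun row => pvCell schematic (if reverse then height - 1 - row else row) col)
        (List.range height) 0])
    []

-- ===== PORT B =====
-- len(column) - len(column.lstrip('#'))
def pvPrefixHashes (column : List Char) : Int :=
  (column.length : Int) - ((column.dropWhile (· == '#')).length : Int)

def schematic_to_heights_alt (schematic : List String) (reverse : Bool) : List Int :=
  let height := schematic.length
  let rows := if reverse then (List.range height).reverse else List.range height
  (List.range ((schematic.headD "").length)).map
    (fun c => pvPrefixHashes (rows.map (fun r => pvCell schematic r c)))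

-- ===== PRECONDITION & SPEC =====
-- Pre_ excludes the empty list (A raises IndexError on schematic[0]) and ragged inputs with a row
-- shorter than the first row, on which A either raises or returns a value only because the early
-- break happens to stop before the short row, while B (which materializes whole columns) raises.
def Pre_schematic_to_heights (schematic : List String) (reverse : Bool) : Prop :=
  schematic ≠ [] ∧ ∀ s ∈ schematic, (schematic.headD "").length ≤ s.length
instance (schematic : List String) (reverse : Bool) : Decidable (Pre_schematic_to_heights schematic reverse) := by unfold Pre_schematic_to_heights; infer_instance

def pvWitness_schematic_to_heights : List String × Bool := (["##", "#.", ".."], true)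

def Spec_schematic_to_heights (schematic : List String) (reverse : Bool) (out : List Int) : Prop := out = schematic_to_heights_alt schematic reverse
instance (schematic : List String) (reverse : Bool) (out : List Int) : Decidable (Spec_schematic_to_heights schematic reverse out) := by unfold Spec_schematic_to_heights; infer_instance

-- ===== CLAIM (what is proved, stated in full; the proofs are below) =====
def Claim_equal_schematic_to_heights : Prop := ∀ (schematic : List String) (reverse : Bool), Dom_schematic_to_heights schematic reverse → Pre_schematic_to_heights schematic reverse → Spec_schematic_to_heights schematic reverse (schematic_to_heights schematic reverse)

-- ===== LEMMAS AND PROOFS =====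

-- foldl-with-append is map
theorem pvFoldl_append_map {α β : Type} (f : α → β) (l : List α) (acc : List β) :
    l.foldl (fun heights x => heights ++ [f x]) acc = acc ++ l.map f := by
  induction l generalizing acc with
  | nil => simp
  | cons x xs ih => simp [List.foldl, ih]

-- the break-loop counts the '#'-prefix of the mapped column
theorem pvAInner_takeWhile (f : Nat → Char) (rs : List Nat) (count : Int) :
    pvAInner f rs count = count + ((rs.map f).takeWhile (· == '#')).length := by
  induction rs generalizing count with
  | nil => simp [pvAInner]
  | cons r rs ih =>
    by_cases h : f r == '#'
    · simp [pvAInner, h, ih]; ring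
    · simp [pvAInner, h]

-- length - dropWhile-length = takeWhile-length
theorem pvPrefixHashes_takeWhile (column : List Char) :
    pvPrefixHashes column = ((column.takeWhile (· == '#')).length : Int) := by
  have h : (column.takeWhile (· == '#')).length + (column.dropWhile (· == '#')).length
      = column.length := by
    rw [← List.length_append, List.takeWhile_append_dropWhile]
  unfold pvPrefixHashes
  omega

-- reversed range as a map over the range
theorem pvRange_reverse (n : Nat) :
    (List.range n).reverse = (List.range n).map (fun i => n - 1 - i) := by
  apply List.ext_getElem
  · simp
  · intro i h1 h2
    simp at h1 ⊢

theorem schematic_to_heights_spec : Claim_equal_schematic_to_heights := by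
  intro schematic reverse _ _
  unfold Spec_schematic_to_heights schematic_to_heights schematic_to_heights_alt
  rw [pvFoldl_append_map]
  simp only [List.nil_append]
  apply List.map_congr_left
  intro c _
  rw [pvAInner_takeWhile, pvPrefixHashes_takeWhile]
  cases reverse with
  | false =>
    simp
  | true =>
    simp only [reduceIte, pvRange_reverse, List.map_map]
    simp [Function.comp_def]
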